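-- pv_equiv track=rewrite | github.com/MatthewBrummund/agentcore-public-stack | backend/tests/supply_chain/test_dockerfile_pinning.py | _is_dnf_pinned
-- ===== SOURCE A (Python) =====
-- def _is_dnf_pinned(package: str) -> bool:
--     """Check if a dnf package has a version pin.
--
--     For dnf, version pinning uses `-` separator but package names can also
--     contain `-` (e.g., gcc-c++, mesa-libGL). The version starts with a digit
--     after the last relevant `-`.
--
--     Strategy: split on `-`, find the first segment that starts with a digit.
--     If such a segment exists (and it's not the first segment), the package is pinned.
--     """
--     parts = package.split("-")
--     if len(parts) < 2:
--         return False
--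
--     # Find the first part that starts with a digit — that's where the version begins
--     for i, part in enumerate(parts):
--         if i == 0:
--             continue  # First part is always package name
--         if part and part[0].isdigit():
--             return True
--
--     return False
-- ===== SOURCE B (Python) =====
-- def _is_dnf_pinned(package: str) -> bool:
--     """Single pass: pinned iff some dash is immediately followed by a digit."""
--     prev_dash = False
--     for ch in package:
--         if prev_dash and ch.isdigit():
--             return True
--         prev_dash = ch == "-"
--     return False
-- ===== Notes on version B (the rewrite author's own statement) =====
-- stated objective: simpler
-- what changed: Replaces splitting on the dash separator plus an indexed loop over the parts list with a single character scan that tracks whether the previous character was a dash, returning True at the first dash-digit adjacency.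
import Mathlib
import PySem

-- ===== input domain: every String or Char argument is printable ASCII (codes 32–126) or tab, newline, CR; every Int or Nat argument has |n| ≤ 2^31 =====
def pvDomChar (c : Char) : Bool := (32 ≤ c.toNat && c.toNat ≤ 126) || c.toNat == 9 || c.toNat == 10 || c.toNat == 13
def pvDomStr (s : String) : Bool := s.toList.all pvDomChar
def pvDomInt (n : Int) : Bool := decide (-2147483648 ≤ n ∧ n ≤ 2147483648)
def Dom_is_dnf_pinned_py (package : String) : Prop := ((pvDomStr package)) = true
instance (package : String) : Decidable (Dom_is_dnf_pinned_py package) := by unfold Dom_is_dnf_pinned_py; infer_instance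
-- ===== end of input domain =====

-- B replaces A's split-on-dash plus indexed loop over the parts with a single scan tracking a previous-dash flag (simpler, same O(n)).


-- ===== PORT A =====
-- the 'for i, part in enumerate(parts)' loop of A
def aLoop : List (Int × List Char) → Bool
  | [] => false
  | (i, part) :: rest =>
    if i == 0 then aLoop rest
    else
      match part with
      | [] => aLoop rest
      | c :: _ => if PySem.Chars.isdigit c then true else aLoop rest

def is_dnf_pinned_py (package : String) : Bool :=
  let parts := PySem.Chars.splitOn package.toList ['-']
  if parts.length < 2 then false
  else aLoop (PySem.List.enumerate parts)

-- ===== PORT B =====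
-- the single scan of Source B, carrying the prev_dash flag
def bLoop (prevDash : Bool) : List Char → Bool
  | [] => false
  | c :: rest => if prevDash && PySem.Chars.isdigit c then true else bLoop (c == '-') rest

def is_dnf_pinned_py_alt (package : String) : Bool := bLoop false package.toList

-- ===== PRECONDITION & SPEC =====
def Spec_is_dnf_pinned_py (package : String) (out : Bool) : Prop := out = is_dnf_pinned_py_alt package
instance (package : String) (out : Bool) : Decidable (Spec_is_dnf_pinned_py package out) := by unfold Spec_is_dnf_pinned_py; infer_instance

-- ===== CLAIM (what is proved, stated in full; the proofs are below) =====
def Claim_equal_is_dnf_pinned_py : Prop := ∀ (package : String), Dom_is_dnf_pinned_py package → Spec_is_dnf_pinned_py package (is_dnf_pinned_py package)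

-- ===== LEMMAS AND PROOFS =====

-- structural description of split on a single '-'
def splitDash : List Char → List Char → List (List Char)
  | cur, [] => [cur]
  | cur, c :: rest => if c = '-' then cur :: splitDash [] rest else splitDash (cur ++ [c]) rest

-- first segment's head digit = head digit of the string
def headDigit : List Char → Bool
  | [] => false
  | c :: _ => PySem.Chars.isdigit c

theorem go_eq : ∀ (fuel : Nat) (l cur : List Char) (acc : List (List Char)),
    l.length < fuel →
    PySem.Chars.splitOn.go ['-'] fuel l cur acc = acc.reverse ++ splitDash cur.reverse l := by
  intro fuel
  induction fuel with
  | zero => intro l cur acc h; omega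
  | succ n ih =>
    intro l cur acc h
    cases l with
    | nil => simp [PySem.Chars.splitOn.go, splitDash]
    | cons c rest =>
      by_cases hc : c = '-'
      · subst hc
        have hpre : List.isPrefixOf ['-'] ('-' :: rest) = true := by
          simp [List.isPrefixOf]
        simp only [PySem.Chars.splitOn.go, hpre, if_pos, List.length_cons, List.length_nil,
          List.drop_succ_cons, List.drop_zero]
        rw [ih rest [] ((cur.reverse) :: acc) (by simpa using Nat.lt_of_succ_lt_succ h)]
        simp [splitDash]
      · have hpre : List.isPrefixOf ['-'] (c :: rest) = false := by
          simp only [List.isPrefixOf, Bool.and_true, beq_eq_false_iff_ne, ne_eq]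
          exact fun h => hc (Eq.symm h)
        simp only [PySem.Chars.splitOn.go, hpre, Bool.false_eq_true, if_false]
        rw [ih rest (c :: cur) acc (by simpa using Nat.lt_of_succ_lt_succ h)]
        simp [splitDash, hc]

theorem splitOn_eq (l : List Char) : PySem.Chars.splitOn l ['-'] = splitDash [] l := by
  unfold PySem.Chars.splitOn
  rw [go_eq (l.length + 1) l [] [] (by omega)]
  simp

theorem splitDash_cur : ∀ (l cur : List Char),
    splitDash cur l = (cur ++ (splitDash [] l).headI) :: (splitDash [] l).tail := by
  intro l
  induction l with
  | nil => intro cur; simp [splitDash]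
  | cons c rest ih =>
    intro cur
    by_cases hc : c = '-'
    · subst hc; simp [splitDash]
    · simp only [splitDash, hc, if_false]
      rw [ih (cur ++ [c])]
      conv_rhs => rw [ih ([] ++ [c])]
      simp

theorem headDigit_headI (l : List Char) : headDigit ((splitDash [] l).headI) = headDigit l := by
  cases l with
  | nil => simp [splitDash, headDigit]
  | cons c rest =>
    by_cases hc : c = '-'
    · subst hc; simp [splitDash, headDigit]; decide
    · simp only [splitDash, hc, if_false]
      rw [show splitDash ([] ++ [c]) rest = splitDash [c] rest by simp,
        splitDash_cur rest [c]]
      simp [headDigit]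

theorem bLoop_eq : ∀ (l : List Char) (prev : Bool),
    bLoop prev l = ((prev && headDigit l) || ((splitDash [] l).tail).any headDigit) := by
  intro l
  induction l with
  | nil => intro prev; simp [bLoop, splitDash, headDigit]
  | cons c rest ih =>
    intro prev
    have hb : bLoop prev (c :: rest) = ((prev && PySem.Chars.isdigit c) || bLoop (c == '-') rest) := by
      simp only [bLoop]
      by_cases h : (prev && PySem.Chars.isdigit c) = true
      · simp [h]
      · simp [h]
    rw [hb, ih]
    by_cases hc : c = '-'
    · subst hc
      have hdig : PySem.Chars.isdigit '-' = false := by decide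
      have hsp : splitDash [] ('-' :: rest) = [] :: splitDash [] rest := by simp [splitDash]
      have hany : (splitDash [] rest).any headDigit
          = (headDigit rest || ((splitDash [] rest).tail).any headDigit) := by
        conv_lhs => rw [splitDash_cur rest []]
        simp [headDigit_headI]
      rw [hsp]
      simp only [List.tail_cons, hany, headDigit, hdig]
      cases prev <;> cases headDigit rest <;> simp
    · have hsp : splitDash [] (c :: rest) = splitDash [c] rest := by simp [splitDash, hc]
      rw [hsp, splitDash_cur rest [c]]
      simp only [List.tail_cons, headDigit]
      have : (c == '-') = false := by simp [hc]
      rw [this]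
      rw [splitDash_cur rest []] ; simp

theorem aLoop_pos : ∀ (ps : List (List Char)) (s : Int), 1 ≤ s →
    aLoop (PySem.List.enumerate ps s) = ps.any headDigit := by
  intro ps
  induction ps with
  | nil => intro s _; simp [PySem.List.enumerate, aLoop]
  | cons p rest ih =>
    intro s hs
    rw [PySem.List.enumerate_cons]
    have hz : (s == 0) = false := by
      simp only [beq_eq_false_iff_ne, ne_eq]; omega
    cases p with
    | nil =>
      simp only [aLoop, hz, Bool.false_eq_true, if_false]
      rw [ih (s+1) (by omega)]
      simp [headDigit]
    | cons c cs =>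
      simp only [aLoop, hz, Bool.false_eq_true, if_false]
      by_cases hd : PySem.Chars.isdigit c = true
      · simp [hd, headDigit]
      · simp only [hd, Bool.false_eq_true, if_false]
        rw [ih (s+1) (by omega)]
        simp [headDigit, Bool.eq_false_iff.mpr hd]

theorem main_eq (l : List Char) :
    (if (splitDash [] l).length < 2 then false else aLoop (PySem.List.enumerate (splitDash [] l)))
      = bLoop false l := by
  obtain ⟨p, ps, hps⟩ : ∃ p ps, splitDash [] l = p :: ps := by
    have hsp := splitDash_cur l []
    exact ⟨_, _, hsp⟩
  rw [bLoop_eq l false, hps]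
  cases ps with
  | nil => simp
  | cons q qs =>
    have hlen : ¬ ((p :: q :: qs).length < 2) := by simp
    simp only [hlen, if_false]
    rw [PySem.List.enumerate_cons]
    simp only [aLoop, beq_self_eq_true, if_true]
    rw [show ((0:Int) + 1) = 1 by norm_num, aLoop_pos (q :: qs) 1 (by omega)]
    simp

-- ===== VERDICT (by name: the statement is the Claim_ definition above) =====
theorem is_dnf_pinned_py_spec : Claim_equal_is_dnf_pinned_py := by
  intro package _
  show is_dnf_pinned_py package = is_dnf_pinned_py_alt package
  unfold is_dnf_pinned_py is_dnf_pinned_py_alt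
  rw [splitOn_eq]
  exact main_eq package.toList
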